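-- pv_equiv track=rewrite | github.com/uedaLabR/nanoModiTune | filter/AttentionClassfication.py | toNumberList
-- ===== SOURCE A (Python) =====
-- def encode_dna(dna):
--
--     base_mapping = {'A': 0, 'T': 1, 'C': 2, 'G': 3}
--     # Convert DNA sequence and secondary structure to numerical values
--     dna_value = sum(base_mapping[base] * (4 ** i) for i, base in enumerate(reversed(dna)))
--     return  dna_value
--
-- def tokonizeN(seq):
--
--     ret = []
--     for n in range(len(seq)-2):
--         ps = seq[n:n+3]
--         token = encode_dna(ps)
--         ret.append(token)
--
--     return ret
--
-- def toNumberList(data):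
--
--     ret = []
--     cnt = 0
--     for seq,label in data:
--         tokens = tokonizeN(seq)
--         ret.append((tokens, label))
--         cnt += 1
--
--     return ret
-- ===== SOURCE B (Python) =====
-- def toNumberList(data):
--     m = {'A': 0, 'T': 1, 'C': 2, 'G': 3}
--     out = []
--     for seq, label in data:
--         tokens = []
--         if len(seq) >= 3:
--             val = m[seq[0]] * 16 + m[seq[1]] * 4 + m[seq[2]]
--             tokens.append(val)
--             for ch in seq[3:]:
--                 val = (val * 4 + m[ch]) % 64
--                 tokens.append(val)
--         out.append((tokens, label))
--     return out
-- ===== Notes on version B (the rewrite author's own statement) =====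
-- stated objective: alternative
-- what changed: Replaces the per-window recomputation (slice each 3-mer and re-sum digit*4^i with enumerate/reversed) by a rolling-hash update: build the first 3-mer code once, then val = (val*4 + m[ch]) % 64 per incoming base.
import Mathlib
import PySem

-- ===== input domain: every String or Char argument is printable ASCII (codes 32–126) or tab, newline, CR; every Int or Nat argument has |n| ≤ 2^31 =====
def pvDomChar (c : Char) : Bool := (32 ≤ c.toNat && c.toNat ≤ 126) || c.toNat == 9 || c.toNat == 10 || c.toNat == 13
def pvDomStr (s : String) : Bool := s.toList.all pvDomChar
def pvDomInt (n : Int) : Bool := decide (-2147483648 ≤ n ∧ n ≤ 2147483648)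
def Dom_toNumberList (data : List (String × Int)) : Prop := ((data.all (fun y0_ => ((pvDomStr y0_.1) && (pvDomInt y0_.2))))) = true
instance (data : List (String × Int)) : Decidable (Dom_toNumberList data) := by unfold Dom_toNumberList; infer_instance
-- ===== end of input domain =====

-- B replaces A's per-window slice-and-resum by a rolling (val*4 + base) % 64 update; a different per-window mechanism of similar cost.
-- Pre_ excludes inputs on which both Pythons raise KeyError (a base outside 'ATCG' in a sequence of length ≥ 3).

-- ===== PORT A =====
-- base_mapping lookup; the else branch is unreachable under Pre_ (Python raises KeyError there)
def bmapA (c : Char) : Int :=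
  if c = 'A' then 0 else if c = 'T' then 1 else if c = 'C' then 2 else 3

def encodeDnaA (dna : List Char) : Int :=
  ((PySem.List.enumerate dna.reverse).map (fun p => bmapA p.2 * (4:Int) ^ p.1.toNat)).sum

def tokonizeNA (seq : String) : List Int :=
  (PySem.List.pyRange 0 ((seq.toList.length : Int) - 2) 1).foldl
    (fun ret n => ret ++ [encodeDnaA (PySem.List.slice seq.toList (some n) (some (n + 3)))]) []

def toNumberList (data : List (String × Int)) : List (List Int × Int) :=
  (data.foldl (fun st p => (st.1 ++ [(tokonizeNA p.1, p.2)], st.2 + 1)) (([], 0) : List (List Int × Int) × Int)).1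

-- ===== PORT B =====
def bmapB (c : Char) : Int :=
  match c with
  | 'A' => 0 | 'T' => 1 | 'C' => 2 | 'G' => 3
  | _ => 3  -- unreachable under Pre_ (Python raises KeyError)

-- rolling update over the remaining bases
def rollB (cs : List Char) (val : Int) : List Int :=
  match cs with
  | [] => []
  | c :: rest =>
    let v := PySem.Int.mod (val * 4 + bmapB c) 64
    v :: rollB rest v

def tokensB (cs : List Char) : List Int :=
  match cs with
  | a :: b :: c :: rest =>
    let v := bmapB a * 16 + bmapB b * 4 + bmapB c
    v :: rollB rest v
  | _ => []

def toNumberList_alt (data : List (String × Int)) : List (List Int × Int) :=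
  data.map (fun p => (tokensB p.1.toList, p.2))

-- ===== PRECONDITION & SPEC =====
-- Excludes exactly the inputs where Python A raises KeyError: a sequence of length ≥ 3 containing a character outside ATCG.
def Pre_toNumberList (data : List (String × Int)) : Prop :=
  (data.all (fun p => decide (p.1.toList.length < 3)
    || p.1.toList.all (fun c => c == 'A' || c == 'T' || c == 'C' || c == 'G'))) = true
instance (data : List (String × Int)) : Decidable (Pre_toNumberList data) := by unfold Pre_toNumberList; infer_instance

def pvWitness_toNumberList : (List (String × Int)) := [("ATCG", 1), ("", 0)]

def Spec_toNumberList (data : List (String × Int)) (out : List (List Int × Int)) : Prop := out = toNumberList_alt data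
instance (data : List (String × Int)) (out : List (List Int × Int)) : Decidable (Spec_toNumberList data out) := by unfold Spec_toNumberList; infer_instance

-- ===== CLAIM (what is proved, stated in full; the proofs are below) =====
def Claim_equal_toNumberList : Prop := ∀ (data : List (String × Int)), Dom_toNumberList data → Pre_toNumberList data → Spec_toNumberList data (toNumberList data)

-- ===== LEMMAS AND PROOFS =====

-- the common mathematical description: list of 3-mer codes, structurally
def winList (cs : List Char) : List Int :=
  match cs with
  | a :: b :: c :: rest => (bmapA a * 16 + bmapA b * 4 + bmapA c) :: winList (b :: c :: rest)
  | _ => []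

theorem bmapB_eq (c : Char) : bmapB c = bmapA c := by
  unfold bmapB bmapA
  split <;> simp_all

theorem bmapA_bounds (c : Char) : 0 ≤ bmapA c ∧ bmapA c ≤ 3 := by
  unfold bmapA; split_ifs <;> omega

-- B side: the rolling state after consuming window [x,y,z] is its code
theorem rollB_eq (rest : List Char) : ∀ (x y z : Char),
    rollB rest (bmapA x * 16 + bmapA y * 4 + bmapA z) = winList (y :: z :: rest) := by
  induction rest with
  | nil => intro x y z; rfl
  | cons c rest ih =>
    intro x y z
    have hx := bmapA_bounds x; have hy := bmapA_bounds y
    have hz := bmapA_bounds z; have hc := bmapA_bounds c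
    have hval : PySem.Int.mod ((bmapA x * 16 + bmapA y * 4 + bmapA z) * 4 + bmapB c) 64
        = bmapA y * 16 + bmapA z * 4 + bmapA c := by
      rw [bmapB_eq]
      rw [PySem.Int.mod_eq_emod_of_pos (by norm_num)]
      omega
    simp only [rollB, winList, hval, ih y z c]

theorem tokensB_eq (cs : List Char) : tokensB cs = winList cs := by
  match cs with
  | [] => rfl
  | [_] => rfl
  | [_, _] => rfl
  | a :: b :: c :: rest =>
    show (bmapB a * 16 + bmapB b * 4 + bmapB c) :: rollB rest (bmapB a * 16 + bmapB b * 4 + bmapB c) = _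
    rw [winList, bmapB_eq a, bmapB_eq b, bmapB_eq c, rollB_eq rest a b c]

-- A side: each window slice is 3 long, and its encode is the 3-mer code
theorem encodeDnaA_three (a b c : Char) :
    encodeDnaA [a, b, c] = bmapA a * 16 + bmapA b * 4 + bmapA c := by
  simp [encodeDnaA, PySem.List.enumerate]
  ring

theorem map_range_windows (cs : List Char) :
    (List.range (cs.length - 2)).map
      (fun k => encodeDnaA ((cs.drop k).take 3)) = winList cs := by
  induction cs using winList.induct with
  | case1 a b c rest ih =>
    have hlen : (a :: b :: c :: rest).length - 2 = rest.length + 1 := by simp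
    rw [hlen, List.range_succ_eq_map, List.map_cons, List.map_map]
    rw [winList]
    refine congrArg₂ List.cons ?_ ?_
    · simp [encodeDnaA_three]
    · rw [← ih]
      have hlen2 : (b :: c :: rest).length - 2 = rest.length := by simp
      rw [hlen2]
      apply List.map_congr_left
      intro k _
      simp [List.drop_succ_cons]
  | case2 cs h =>
    match cs with
    | [] => rfl
    | [_] => rfl
    | [_, _] => rfl
    | a :: b :: c :: r => exact absurd rfl (h a b c r)

theorem tokonizeNA_eq (seq : String) : tokonizeNA seq = winList seq.toList := by
  unfold tokonizeNA
  rw [PySem.List.foldl_append_singleton_eq_map, List.nil_append]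
  rcases Nat.lt_or_ge seq.toList.length 2 with h | h
  · rw [PySem.List.pyRange_one_eq_nil (by omega)]
    rw [← map_range_windows]
    have : seq.toList.length - 2 = 0 := by omega
    rw [this]; rfl
  · have hcast : (seq.toList.length : Int) - 2 = ((seq.toList.length - 2 : Nat) : Int) := by omega
    rw [hcast, PySem.List.pyRange_zero_natCast, List.map_map]
    rw [← map_range_windows]
    apply List.map_congr_left
    intro k hk
    simp only [Function.comp]
    congr 1
    rw [show ((k : Int) + 3) = ((k : Int) + ((3 : Nat) : Int)) from by push_cast; ring]
    rw [PySem.List.slice_natCast_add]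

-- the A-side outer loop is a map (cnt is dead state)
theorem toNumberList_foldl (data : List (String × Int)) :
    ∀ (acc : List (List Int × Int)) (n : Int),
      (data.foldl (fun st p => (st.1 ++ [(tokonizeNA p.1, p.2)], st.2 + 1)) (acc, n)).1
        = acc ++ data.map (fun p => (tokonizeNA p.1, p.2)) := by
  induction data with
  | nil => intro acc n; simp
  | cons p rest ih => intro acc n; simp [List.foldl_cons, ih]

-- ===== VERDICT (by name: the statement is the Claim_ definition above) =====
theorem toNumberList_spec : Claim_equal_toNumberList := by
  intro data _ _
  unfold Spec_toNumberList toNumberList toNumberList_alt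
  rw [toNumberList_foldl data [] 0, List.nil_append]
  apply List.map_congr_left
  intro p _
  rw [tokonizeNA_eq, tokensB_eq]
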